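-- pv_equiv track=rewrite | github.com/FellowCode/ServolineMotorTkinter | commands.py | get_LRC
-- ===== SOURCE A (Python) =====
-- def get_LRC(message):
--     if message[0] == ':':
--         message = message[1:]
--     lrc = 0
--     while len(message)>0:
--         hexi = message[:2]
--         message = message[2:]
--         lrc += int(hexi, 16)
--         if lrc>int('ff', 16):
--             lrc -= int('ff', 16) + 1
--     lrc = hex(int('ff', 16) - lrc + 1).upper()[2:]
--     if len(lrc)==1:
--         lrc = '0' + lrc
--     elif len(lrc)==3:
--         lrc = lrc[1:]
--     return lrc
-- ===== SOURCE B (Python) =====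
-- def get_LRC(message):
--     if message[0] == ':':
--         message = message[1:]
--     total = sum(int(message[i:i+2], 16) for i in range(0, len(message), 2))
--     return format((-total) % 256, '02X')
-- ===== Notes on version B (the rewrite author's own statement) =====
-- stated objective: faster
-- what changed: Replaces the running conditional-subtraction loop and the hex-string pad/trim branches by a one-pass sum of the byte-pairs with a closed-form negated sum modulo 256 rendered directly as two uppercase hex digits.
-- outside the precondition, e.g. on get_LRC('-f'): A returns '0F', B returns '0F'
import Mathlib
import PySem

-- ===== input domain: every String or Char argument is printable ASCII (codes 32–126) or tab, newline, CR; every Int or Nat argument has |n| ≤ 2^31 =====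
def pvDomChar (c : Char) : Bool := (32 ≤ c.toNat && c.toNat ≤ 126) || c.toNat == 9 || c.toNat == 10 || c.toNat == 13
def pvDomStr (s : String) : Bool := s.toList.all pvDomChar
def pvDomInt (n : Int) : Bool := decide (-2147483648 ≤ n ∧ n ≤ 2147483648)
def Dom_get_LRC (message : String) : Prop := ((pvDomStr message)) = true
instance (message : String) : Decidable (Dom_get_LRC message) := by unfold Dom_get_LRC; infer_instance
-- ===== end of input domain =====

-- B replaces A's running conditional-subtraction loop and hex-string pad/trim branches by a
-- one-pass sum with a closed-form negated-sum-mod-256 rendered as two uppercase hex digits (faster: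
-- A re-slices the remaining message each iteration, B indexes it in one pass).

-- ===== PORT A =====
-- hex digit value table of Python's int(·,16), exact on ASCII
def pvHexVal? (c : Char) : Option Int :=
  if 48 ≤ c.toNat ∧ c.toNat ≤ 57 then some ((c.toNat : Int) - 48)
  else if 97 ≤ c.toNat ∧ c.toNat ≤ 102 then some ((c.toNat : Int) - 87)
  else if 65 ≤ c.toNat ∧ c.toNat ≤ 70 then some ((c.toNat : Int) - 55)
  else none

def pvIsWs (c : Char) : Bool := c = ' ' ∨ c = '\t' ∨ c = '\n' ∨ c = '\r'

-- port of int(s, 16) for strings of length ≤ 2 over the Dom character set (exact there: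
-- optional whitespace/sign around a hex digit, or two hex digits; none = ValueError)
def pvIntHex2? (s : List Char) : Option Int :=
  match s with
  | [c] => pvHexVal? c
  | [a, b] =>
    match pvHexVal? a, pvHexVal? b with
    | some x, some y => some (16 * x + y)
    | some x, none => if pvIsWs b then some x else none
    | none, some y =>
        if a = '+' ∨ pvIsWs a then some y
        else if a = '-' then some (-y) else none
    | none, none => none
  | _ => none

-- A's while-loop: consume two chars at a time, add, conditionally subtract 256
def lrcLoopA : List Char → Int → Option Int
  | [], lrc => some lrc
  | [c], lrc =>             -- hexi = message[:2] is the single char; message[2:] = ''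
    match pvIntHex2? [c] with
    | none => none          -- int(hexi, 16) raises ValueError (excluded by Pre_)
    | some v =>
      let l := lrc + v
      lrcLoopA [] (if l > 255 then l - 256 else l)
  | a :: b :: rest, lrc =>  -- hexi = first two chars, message = the rest
    match pvIntHex2? [a, b] with
    | none => none          -- int(hexi, 16) raises ValueError (excluded by Pre_)
    | some v =>
      let l := lrc + v
      lrcLoopA rest (if l > 255 then l - 256 else l)

def pvHexDigit (n : Nat) : Char :=
  if n < 10 then Char.ofNat (48 + n) else Char.ofNat (55 + n)

-- uppercase hex digits of a positive number (hex(n).upper()[2:] for n > 0);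
-- fuel-guarded structural recursion (fuel = n always suffices since n/16 < n for n > 0)
def pvHexCharsAux : Nat → Nat → List Char
  | 0, _ => []
  | _ + 1, 0 => []
  | fuel + 1, m + 1 => pvHexCharsAux fuel ((m + 1) / 16) ++ [pvHexDigit ((m + 1) % 16)]

def pvHexChars (n : Nat) : List Char := pvHexCharsAux n n

-- hex(n).upper()[2:], exact for n ≥ 0 (A's argument 256 - lrc is ≥ 1 under Pre_)
def pvHexA (n : Nat) : List Char := if n = 0 then ['0'] else pvHexChars n

def get_LRC (message : String) : String :=
  match PySem.List.pyGet? message.toList 0 with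
  | none => ""   -- message[0] raises IndexError on "" (excluded by Pre_)
  | some c0 =>
    let ms := if c0 = ':' then message.toList.drop 1 else message.toList
    match lrcLoopA ms 0 with
    | none => ""   -- ValueError from int(hexi, 16) (excluded by Pre_)
    | some f =>
      let l := pvHexA (255 - f + 1).toNat
      let l := if l.length = 1 then '0' :: l
               else if l.length = 3 then l.drop 1 else l
      String.ofList l

-- ===== PORT B =====
-- sum(int(message[i:i+2],16) for i in range(0, len(message), 2)), left to right
def sumChunksB : List Char → Option Int
  | [] => some 0
  | [c] =>
    match pvIntHex2? [c] with
    | some v => some v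
    | none => none   -- ValueError (excluded by Pre_)
  | a :: b :: rest =>
    match pvIntHex2? [a, b], sumChunksB rest with
    | some v, some s => some (v + s)
    | _, _ => none   -- ValueError (excluded by Pre_)

def get_LRC_alt (message : String) : String :=
  match PySem.List.pyGet? message.toList 0 with
  | none => ""   -- message[0] raises IndexError on "" (excluded by Pre_)
  | some c0 =>
    let ms := if c0 = ':' then message.toList.drop 1 else message.toList
    match sumChunksB ms with
    | none => ""
    | some total =>
      let r := (PySem.Int.mod (-total) 256).toNat
      -- the two-uppercase-hex-digit format of r, exact for 0 ≤ r < 256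
      String.ofList [pvHexDigit (r / 16), pvHexDigit (r % 16)]

-- ===== PRECONDITION & SPEC =====
-- a byte-pair token Pre_ admits: a hex digit, two hex digits, or one hex digit with
-- one leading plus-sign/whitespace or trailing whitespace (all parsed by int(·,16); value in [0,255])
def pvTokOK (s : List Char) : Bool :=
  match s with
  | [c] => (pvHexVal? c).isSome
  | [a, b] =>
      ((pvHexVal? a).isSome && ((pvHexVal? b).isSome || pvIsWs b))
      || ((a = '+' || pvIsWs a) && (pvHexVal? b).isSome)
  | _ => false

-- Pre_ excludes the empty message and messages with a non-hex byte-pair (A raises IndexError /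
-- ValueError there) and messages containing a minus-signed byte-pair, on which A returns a value but
-- its once-per-step conditional subtraction makes the result an accident of the loop.
-- Closed form: after stripping a leading colon, the two-character slice at every even index is a valid token.
def Pre_get_LRC (message : String) : Prop :=
  message.toList ≠ [] ∧
  ∀ i < (if message.toList.take 1 = [':'] then message.toList.drop 1
         else message.toList).length,
    i % 2 = 0 →
    pvTokOK (((if message.toList.take 1 = [':'] then message.toList.drop 1
               else message.toList).drop i).take 2) = true
instance (message : String) : Decidable (Pre_get_LRC message) := by unfold Pre_get_LRC; infer_instance

def pvWitness_get_LRC : String := ":0102"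

def Spec_get_LRC (message : String) (out : String) : Prop := out = get_LRC_alt message
instance (message : String) (out : String) : Decidable (Spec_get_LRC message out) := by unfold Spec_get_LRC; infer_instance

-- ===== CLAIM (what is proved, stated in full; the proofs are below) =====
def Claim_equal_get_LRC : Prop := ∀ (message : String), Dom_get_LRC message → Pre_get_LRC message → Spec_get_LRC message (get_LRC message)

-- ===== LEMMAS AND PROOFS =====

lemma pvHexVal?_bounds {c : Char} {v : Int} (h : pvHexVal? c = some v) : 0 ≤ v ∧ v < 16 := by
  unfold pvHexVal? at h
  split_ifs at h <;> (injection h with h; omega)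

lemma pvWs_hexVal_none {b : Char} (h : pvIsWs b = true) : pvHexVal? b = none := by
  have hb : b = ' ' ∨ b = '\t' ∨ b = '\n' ∨ b = '\r' := by simpa [pvIsWs] using h
  rcases hb with hb | hb | hb | hb <;> subst hb <;> decide

lemma pvTokOK_parse {s : List Char} (h : pvTokOK s = true) :
    ∃ v, pvIntHex2? s = some v ∧ 0 ≤ v ∧ v < 256 := by
  match s with
  | [] => simp [pvTokOK] at h
  | [c] =>
    simp only [pvTokOK, Option.isSome_iff_exists] at h
    obtain ⟨v, hv⟩ := h
    obtain ⟨h0, h1⟩ := pvHexVal?_bounds hv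
    exact ⟨v, by simpa [pvIntHex2?] using hv, h0, by omega⟩
  | [a, b] =>
    simp only [pvTokOK, Bool.or_eq_true, Bool.and_eq_true, Option.isSome_iff_exists,
      decide_eq_true_eq] at h
    rcases h with ⟨⟨x, hx⟩, ⟨y, hy⟩ | hwb⟩ | ⟨ha, y, hy⟩
    · obtain ⟨hx0, hx1⟩ := pvHexVal?_bounds hx
      obtain ⟨hy0, hy1⟩ := pvHexVal?_bounds hy
      exact ⟨16 * x + y, by simp [pvIntHex2?, hx, hy], by omega, by omega⟩
    · obtain ⟨hx0, hx1⟩ := pvHexVal?_bounds hx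
      exact ⟨x, by simp [pvIntHex2?, hx, pvWs_hexVal_none hwb, hwb], hx0, by omega⟩
    · obtain ⟨hy0, hy1⟩ := pvHexVal?_bounds hy
      have han : pvHexVal? a = none := by
        rcases ha with ha | ha
        · subst ha; decide
        · exact pvWs_hexVal_none ha
      have ha' : a = '+' ∨ pvIsWs a = true := ha
      exact ⟨y, by simp [pvIntHex2?, han, hy, ha'], hy0, by omega⟩
  | _ :: _ :: _ :: _ => simp [pvTokOK] at h

-- loop invariant: under Pre_'s chunk condition, A's running value is the sum modulo 256
lemma loop_eq (ms : List Char)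
    (h : ∀ i < ms.length, i % 2 = 0 → pvTokOK ((ms.drop i).take 2) = true) :
    ∃ total, sumChunksB ms = some total ∧ 0 ≤ total ∧
      ∀ lrc : Int, 0 ≤ lrc → lrc < 256 →
        lrcLoopA ms lrc = some ((lrc + total) % 256) := by
  induction hn : ms.length using Nat.strong_induction_on generalizing ms with
  | _ n ih =>
    match ms with
    | [] =>
      refine ⟨0, rfl, le_refl 0, fun lrc h0 h1 => ?_⟩
      simp only [lrcLoopA]
      congr 1
      omega
    | [c] =>
      obtain ⟨v, hv, hv0, hv1⟩ := pvTokOK_parse (by simpa using h 0 (by simp) rfl)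
      refine ⟨v, by simp [sumChunksB, hv], by omega, fun lrc h0 h1 => ?_⟩
      simp only [lrcLoopA, hv]
      congr 1
      split <;> omega
    | a :: b :: rest =>
      obtain ⟨v, hv, hv0, hv1⟩ := pvTokOK_parse (by simpa using h 0 (by simp) rfl)
      have hrest : ∀ i < rest.length, i % 2 = 0 → pvTokOK ((rest.drop i).take 2) = true := by
        intro i hi he
        simpa using h (i + 2) (by simp; omega) (by omega)
      obtain ⟨t, ht, ht0, hloop⟩ := ih rest.length (by subst hn; simp) _ hrest rfl
      refine ⟨v + t, by simp [sumChunksB, hv, ht], by omega, fun lrc h0 h1 => ?_⟩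
      simp only [lrcLoopA, hv]
      rw [hloop _ (by split <;> omega) (by split <;> omega)]
      congr 1
      split <;> omega

-- the final formatting agrees: A's hex/pad/trim of 256 - f equals B's two-digit (-f) % 256
set_option maxRecDepth 40000 in
lemma fmt_eq : ∀ k : Fin 256,
    (let l := pvHexA (255 - (k : Int) + 1).toNat
     (if l.length = 1 then '0' :: l
      else if l.length = 3 then l.drop 1 else l))
    = [pvHexDigit ((((-(k : Int)) % 256).toNat) / 16),
       pvHexDigit ((((-(k : Int)) % 256).toNat) % 16)] := by
  decide

theorem get_LRC_spec_aux (message : String) (hpre : Pre_get_LRC message) :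
    get_LRC message = get_LRC_alt message := by
  obtain ⟨hne, hok⟩ := hpre
  unfold get_LRC get_LRC_alt
  match hms : message.toList with
  | [] => exact absurd hms hne
  | c :: rest =>
    rw [PySem.List.pyGet?_zero_cons]
    simp only
    rw [hms] at hok
    have hok' : ∀ i < (if c = ':' then (c :: rest).drop 1 else c :: rest).length, i % 2 = 0 →
        pvTokOK (((if c = ':' then (c :: rest).drop 1 else c :: rest).drop i).take 2) = true := by
      by_cases hc : c = ':' <;> simp [hc] at hok ⊢ <;> exact hok
    obtain ⟨total, hsum, ht0, hloop⟩ := loop_eq _ hok'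
    rw [hsum, hloop 0 (by omega) (by omega)]
    simp only
    have hf : ((0 : Int) + total) % 256 = total % 256 := by omega
    rw [hf]
    have hlt : total % 256 < 256 := by omega
    have hge : 0 ≤ total % 256 := by omega
    have hmod : PySem.Int.mod (-total) 256 = (-(total % 256 : Int)) % 256 := by
      rw [PySem.Int.mod_eq_emod_of_pos (by omega)]
      omega
    have hfin := fmt_eq ⟨(total % 256).toNat, by omega⟩
    simp only at hfin
    rw [hmod]
    have hcast : (((total % 256).toNat : Int)) = total % 256 := by omega
    rw [← hcast]
    exact congrArg String.ofList hfin

-- ===== VERDICT (by name: the statement is the Claim_ definition above) =====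
theorem get_LRC_spec : Claim_equal_get_LRC := by
  intro message _ hpre
  exact get_LRC_spec_aux message hpre
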